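-- pv_equiv track=rewrite | github.com/edwh/advent-pdp11 | scripts/create_tape.py | encode_rad50
-- ===== SOURCE A (Python) =====
-- def char_to_rad50(c):
--     """Convert a single character to RAD50 value."""
--     c = c.upper()
--     if c == ' ':
--         return 0
--     elif 'A' <= c <= 'Z':
--         return ord(c) - ord('A') + 1
--     elif c == '$':
--         return 27
--     elif c == '.':
--         return 28
--     elif '0' <= c <= '9':
--         return ord(c) - ord('0') + 30
--     else:
--         return 0  # Unknown chars become space
--
-- def encode_rad50(s, length=3):
--     """Encode a string to RAD50 (3 chars per 16-bit word)."""
--     # Pad or truncate to exact length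
--     s = (s + ' ' * length)[:length]
--
--     result = []
--     for i in range(0, length, 3):
--         chunk = s[i:i+3]
--         if len(chunk) < 3:
--             chunk = chunk + ' ' * (3 - len(chunk))
--
--         c1 = char_to_rad50(chunk[0])
--         c2 = char_to_rad50(chunk[1])
--         c3 = char_to_rad50(chunk[2])
--
--         word = (c1 * 40 + c2) * 40 + c3
--         result.append(word)
--
--     return result
-- ===== SOURCE B (Python) =====
-- CHARSET = " ABCDEFGHIJKLMNOPQRSTUVWXYZ$." + chr(1) + "0123456789"
--
-- def encode_rad50(s, length=3):
--     """Encode a string to RAD50 by a single streaming pass: each char's value is its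
--     position in CHARSET, accumulated Horner-style; every third char flushes a word."""
--     if length <= 0:
--         return []
--     padded = (s + ' ' * length)[:length]
--     padded = padded + ' ' * (-len(padded) % 3)
--     words = []
--     w = 0
--     k = 0
--     for c in padded:
--         v = CHARSET.find(c.upper())
--         w = 40 * w + (0 if v < 0 else v)
--         k = k + 1
--         if k == 3:
--             words.append(w)
--             w = 0
--             k = 0
--     return words
-- ===== Notes on version B (the rewrite author's own statement) =====
-- stated objective: alternative
-- what changed: B replaces A's stride-3 index loop with per-chunk slicing and a per-character comparison cascade by a single streaming pass: the string is padded once to a multiple of 3, each character's value is its position in a RAD50 charset string (str.find), accumulated Horner-style into a running word that is flushed every third character.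
import Mathlib
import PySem

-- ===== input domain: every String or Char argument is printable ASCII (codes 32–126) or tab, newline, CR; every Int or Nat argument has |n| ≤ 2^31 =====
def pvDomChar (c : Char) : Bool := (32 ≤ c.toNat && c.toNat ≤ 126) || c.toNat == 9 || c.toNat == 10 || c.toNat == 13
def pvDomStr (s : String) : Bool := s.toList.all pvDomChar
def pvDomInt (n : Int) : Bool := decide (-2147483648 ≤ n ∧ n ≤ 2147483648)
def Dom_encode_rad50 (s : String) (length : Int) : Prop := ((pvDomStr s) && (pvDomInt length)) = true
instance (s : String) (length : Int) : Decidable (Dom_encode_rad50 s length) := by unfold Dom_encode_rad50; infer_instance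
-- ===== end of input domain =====

-- B encodes in one streaming pass: each char's value is its position in a RAD50 charset
-- string, accumulated Horner-style, flushing a word every third char (alternative decomposition).


-- ===== PORT A =====
def char_to_rad50 (c : Char) : Int :=
  let c := PySem.Chars.upperChar c
  if c = ' ' then 0
  else if 'A' ≤ c ∧ c ≤ 'Z' then (c.toNat : Int) - ('A'.toNat : Int) + 1
  else if c = '$' then 27
  else if c = '.' then 28
  else if '0' ≤ c ∧ c ≤ '9' then (c.toNat : Int) - ('0'.toNat : Int) + 30
  else 0

def encode_rad50 (s : String) (length : Int) : List Int :=
  -- s = (s + ' ' * length)[:length]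
  let cs := PySem.List.slice (s.toList ++ PySem.List.pyRepeat [' '] length) none (some length)
  (PySem.List.pyRange 0 length 3).foldl (fun result i =>
    let chunk := PySem.List.slice cs (some i) (some (i + 3))
    let chunk := if chunk.length < 3 then chunk ++ List.replicate (3 - chunk.length) ' ' else chunk
    -- chunk[0]/chunk[1]/chunk[2]: always in range (chunk is padded to 3 chars), so pyGetD is exact
    let c1 := char_to_rad50 (PySem.List.pyGetD chunk 0 ' ')
    let c2 := char_to_rad50 (PySem.List.pyGetD chunk 1 ' ')
    let c3 := char_to_rad50 (PySem.List.pyGetD chunk 2 ' ')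
    result ++ [(c1 * 40 + c2) * 40 + c3]) []

-- ===== PORT B =====
-- CHARSET = " ABCDEFGHIJKLMNOPQRSTUVWXYZ$." + chr(1) + "0123456789"  (chr(1) fills the unused code 29)
def rad50Charset : List Char :=
  " ABCDEFGHIJKLMNOPQRSTUVWXYZ$.".toList ++ [Char.ofNat 1] ++ "0123456789".toList

-- the loop body: state (words, w, k); every third char flushes w into words
def rad50Step (st : List Int × Int × Int) (c : Char) : List Int × Int × Int :=
  let v := PySem.Chars.find rad50Charset (PySem.Chars.upper [c])
  let w := 40 * st.2.1 + (if v < 0 then 0 else v)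
  let k := st.2.2 + 1
  if k = 3 then (st.1 ++ [w], 0, 0) else (st.1, w, k)

def encode_rad50_alt (s : String) (length : Int) : List Int :=
  if length ≤ 0 then []
  else
    let padded := PySem.List.slice (s.toList ++ PySem.List.pyRepeat [' '] length) none (some length)
    -- padded = padded + ' ' * (-len(padded) % 3)
    let padded2 := padded ++ PySem.List.pyRepeat [' '] (PySem.Int.mod (-(padded.length : Int)) 3)
    (padded2.foldl rad50Step ([], 0, 0)).1

-- ===== PRECONDITION & SPEC =====
def Spec_encode_rad50 (s : String) (length : Int) (out : List Int) : Prop := out = encode_rad50_alt s length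
instance (s : String) (length : Int) (out : List Int) : Decidable (Spec_encode_rad50 s length out) := by unfold Spec_encode_rad50; infer_instance

-- ===== CLAIM (what is proved, stated in full; the proofs are below) =====
def Claim_equal_encode_rad50 : Prop := ∀ (s : String) (length : Int), Dom_encode_rad50 s length → Spec_encode_rad50 s length (encode_rad50 s length)

-- ===== LEMMAS AND PROOFS =====

-- the word A computes for the chunk starting at index i of the padded char list
def wordAt (cs : List Char) (i : Int) : Int :=
  let chunk := PySem.List.slice cs (some i) (some (i + 3))
  let chunk := if chunk.length < 3 then chunk ++ List.replicate (3 - chunk.length) ' ' else chunk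
  (char_to_rad50 (PySem.List.pyGetD chunk 0 ' ') * 40 + char_to_rad50 (PySem.List.pyGetD chunk 1 ' ')) * 40 +
    char_to_rad50 (PySem.List.pyGetD chunk 2 ' ')

theorem encode_rad50_eq_map (s : String) (length : Int) :
    encode_rad50 s length =
      (PySem.List.pyRange 0 length 3).map
        (wordAt (PySem.List.slice (s.toList ++ PySem.List.pyRepeat [' '] length) none (some length))) := by
  unfold encode_rad50 wordAt
  rw [PySem.List.foldl_append_singleton_eq_map]
  simp

-- B's per-character value
def rad50Val (c : Char) : Int :=
  let v := PySem.Chars.find rad50Charset (PySem.Chars.upper [c])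
  if v < 0 then 0 else v

-- what B's fold produces on a list whose length is a multiple of 3
def triplePack : List Char → List Int
  | a :: b :: c :: t => (40 * (40 * (40 * 0 + rad50Val a) + rad50Val b) + rad50Val c) :: triplePack t
  | _ => []

-- B's fold, started at (words, 0, 0) on a multiple-of-3 list, appends one word per triple
theorem fold3 : ∀ (n : Nat) (p : List Char), p.length ≤ n → p.length % 3 = 0 → ∀ (words : List Int),
    p.foldl rad50Step (words, 0, 0) = (words ++ triplePack p, 0, 0) := by
  intro n
  induction n with
  | zero =>
    intro p hn _ words
    obtain rfl := List.eq_nil_of_length_eq_zero (Nat.le_zero.1 hn)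
    simp [triplePack]
  | succ n ih =>
    intro p hn h3 words
    rcases p with _ | ⟨a, p⟩
    · simp [triplePack]
    rcases p with _ | ⟨b, p⟩
    · simp only [List.length_cons, List.length_nil] at h3
      omega
    rcases p with _ | ⟨c, p⟩
    · simp only [List.length_cons, List.length_nil] at h3
      omega
    · simp only [List.foldl_cons, rad50Step]
      norm_num
      rw [ih p (by simp only [List.length_cons] at hn; omega)
            (by simp only [List.length_cons] at h3 ⊢; omega) (words ++ [_])]
      simp only [triplePack, List.append_assoc, List.cons_append, List.nil_append]
      refine congrArg (fun z => (words ++ z, (0 : Int), (0 : Int))) ?_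
      congr 1
      simp only [rad50Val]
      split_ifs <;> ring

-- A's branch cascade agrees with B's charset-position lookup on every in-domain char
set_option maxRecDepth 20000 in
theorem charset_ok (c : Char) (h : pvDomChar c = true) :
    char_to_rad50 c = rad50Val c := by
  have h127 : c.toNat < 127 := by simp [pvDomChar] at h; omega
  obtain ⟨n, hn, rfl⟩ : ∃ n, n < 127 ∧ Char.ofNat n = c := ⟨c.toNat, h127, Char.ofNat_toNat c⟩
  interval_cases n <;> revert h <;> decide

-- A's range(0, m, 3) as a plain Nat-range map
theorem pyRange03 (m : Nat) :
    PySem.List.pyRange 0 (m : Int) 3 = (List.range ((m + 2) / 3)).map (fun k : Nat => (0 : Int) + 3 * (k : Int)) := by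
  rw [PySem.List.pyRange_of_pos 0 (m : Int) (by norm_num)]
  congr 1
  split_ifs with h
  · have e : ((m : Int) - 0 + 3 - 1) / 3 = (((m + 2) / 3 : Nat) : Int) := by
      rw [Int.natCast_ediv]
      push_cast
      ring_nf
    rw [e, Int.toNat_natCast]
  · have : m = 0 := by omega
    subst this
    norm_num

-- A's word at shifted index = A's word over the 3-dropped list
theorem wordAt_shift (cs : List Char) (i : Nat) :
    wordAt cs ((i : Int) + 3) = wordAt (cs.drop 3) (i : Int) := by
  have key : PySem.List.slice cs (some ((i : Int) + 3)) (some (((i : Int) + 3) + 3)) =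
      PySem.List.slice (cs.drop 3) (some (i : Int)) (some ((i : Int) + 3)) := by
    rw [PySem.List.slice_toNat _ (by omega) (by omega),
        PySem.List.slice_toNat _ (by omega) (by omega)]
    have h1 : ((i : Int) + 3).toNat = i + 3 := by omega
    have h2 : ((i : Int) + 3 + 3).toNat = i + 6 := by omega
    have h3 : ((i : Int)).toNat = i := by omega
    have h4 : i + 6 - (i + 3) = 3 := by omega
    have h5 : i + 3 - i = 3 := by omega
    rw [h1, h2, h3, h4, h5, List.drop_drop, Nat.add_comm 3 i]
  unfold wordAt
  rw [key]

theorem slice3 (xs : List Char) : PySem.List.slice xs none (some (3 : Int)) = xs.take 3 := by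
  rw [PySem.List.slice_to xs (by norm_num)]
  rfl

-- A's first word, written out for lists of length 1, 2 and ≥ 3
theorem wordAt_zero_eval (cs : List Char) :
    wordAt cs 0 =
      (char_to_rad50 (PySem.List.pyGetD ((cs.take 3 ++ [' ', ' ', ' ']).take 3) 0 ' ') * 40 +
       char_to_rad50 (PySem.List.pyGetD ((cs.take 3 ++ [' ', ' ', ' ']).take 3) 1 ' ')) * 40 +
       char_to_rad50 (PySem.List.pyGetD ((cs.take 3 ++ [' ', ' ', ' ']).take 3) 2 ' ') := by
  unfold wordAt
  have h03 : ((0 : Int) + 3) = (3 : Int) := by norm_num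
  rw [h03, PySem.List.slice_zero_start, slice3]
  rcases cs with _ | ⟨a, cs⟩
  · rfl
  rcases cs with _ | ⟨b, cs⟩
  · rfl
  rcases cs with _ | ⟨c, cs⟩
  · rfl
  · simp [PySem.List.pyGetD]

-- heads agree: A's first word is B's pack of the first padded triple
theorem head_eq (a b c : Char) (ha : pvDomChar a = true) (hb : pvDomChar b = true)
    (hc : pvDomChar c = true) :
    (char_to_rad50 a * 40 + char_to_rad50 b) * 40 + char_to_rad50 c =
      40 * (40 * (40 * 0 + rad50Val a) + rad50Val b) + rad50Val c := by
  rw [charset_ok a ha, charset_ok b hb, charset_ok c hc]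
  ring

-- the heart of the proof: A's stride-3 index map over a list of exactly its own length
-- equals B's triple packing of the same list padded to a multiple of 3
theorem main_triple : ∀ (n : Nat) (cs : List Char), cs.length ≤ n →
    (∀ x ∈ cs, pvDomChar x = true) →
    (PySem.List.pyRange 0 (cs.length : Int) 3).map (wordAt cs) =
      triplePack (cs ++ List.replicate ((PySem.Int.mod (-(cs.length : Int)) 3).toNat) ' ') := by
  intro n
  induction n with
  | zero =>
    intro cs h _
    obtain rfl := List.eq_nil_of_length_eq_zero (Nat.le_zero.1 h)
    rw [pyRange03]
    simp [triplePack]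
  | succ n ih =>
    intro cs hlen hdom
    rcases cs with _ | ⟨a, t⟩
    · rw [pyRange03]
      simp [triplePack]
    · have hsp : pvDomChar ' ' = true := by decide
      have hmod : ∀ (j : Int), PySem.Int.mod (-j) 3 = (-j) % 3 :=
        fun j => PySem.Int.mod_eq_emod_of_pos (by norm_num)
      rw [pyRange03]
      have hm : ((a :: t).length + 2) / 3 = ((a :: t).length - 1) / 3 + 1 := by
        simp
        omega
      rw [hm, List.range_succ_eq_map]
      simp only [List.map_cons, List.map_map]
      have h0 : ((0 : Int) + 3 * ((0 : Nat) : Int)) = 0 := by norm_num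
      rw [h0, wordAt_zero_eval]
      rcases t with _ | ⟨b, t⟩
      · -- cs = [a]: one word, pad with two spaces
        have hq : (PySem.Int.mod (-(([a] : List Char).length : Int)) 3).toNat = 2 := by
          rw [hmod]
          simp only [List.length_cons, List.length_nil]
          omega
        rw [hq]
        have hj : (([a] : List Char).length - 1) / 3 = 0 := by norm_num
        rw [hj]
        simp only [List.range_zero, List.map_nil]
        simp only [List.take, List.cons_append, List.nil_append, triplePack, List.replicate]
        simp [PySem.List.pyGetD]
        rw [head_eq a ' ' ' ' (hdom a (by simp)) hsp hsp]
        ring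
      rcases t with _ | ⟨c, t⟩
      · -- cs = [a, b]: one word, pad with one space
        have hq : (PySem.Int.mod (-(([a, b] : List Char).length : Int)) 3).toNat = 1 := by
          rw [hmod]
          simp only [List.length_cons, List.length_nil]
          omega
        rw [hq]
        have hj : (([a, b] : List Char).length - 1) / 3 = 0 := by norm_num
        rw [hj]
        simp only [List.range_zero, List.map_nil]
        simp only [List.take, List.cons_append, List.nil_append, triplePack, List.replicate]
        simp [PySem.List.pyGetD]
        rw [head_eq a b ' ' (hdom a (by simp)) (hdom b (by simp)) hsp]
        ring
      · -- cs = a :: b :: c :: t: full head triple, recurse on t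
        simp only [List.cons_append, triplePack]
        congr 1
        · simp only [List.take, List.cons_append]
          simp [PySem.List.pyGetD]
          rw [head_eq a b c (hdom a (by simp)) (hdom b (by simp)) (hdom c (by simp))]
          ring
        · have hq2 : (PySem.Int.mod (-((t.length : Nat) : Int)) 3).toNat =
              (PySem.Int.mod (-(((a :: b :: c :: t).length : Nat) : Int)) 3).toNat := by
            rw [hmod, hmod]
            simp only [List.length_cons]
            omega
          have hdom' : ∀ x ∈ t, pvDomChar x = true :=
            fun x hx => hdom x (by simp [hx])
          rw [← hq2, ← ih t (by simp only [List.length_cons] at hlen; omega) hdom', pyRange03, List.map_map]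
          have hj : (t.length + 2) / 3 = ((a :: b :: c :: t).length - 1) / 3 := by
            simp only [List.length_cons]
            omega
          rw [hj]
          refine List.map_congr_left (fun k _ => ?_)
          have e1 : ((0 : Int) + 3 * (((k + 1 : Nat)) : Int)) = ((3 * k : Nat) : Int) + 3 := by
            push_cast
            ring
          have e2 : ((3 * k : Nat) : Int) = (0 : Int) + 3 * (k : Int) := by
            push_cast
            ring
          simp only [Function.comp]
          rw [e1]
          have hshift : wordAt (a :: b :: c :: t) (((3 * k : Nat) : Int) + 3) = wordAt t ((3 * k : Nat) : Int) :=
            wordAt_shift (a :: b :: c :: t) (3 * k)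
          rw [hshift, e2]

-- ===== VERDICT (by name: the statement is the Claim_ definition above) =====
set_option maxHeartbeats 1000000 in
theorem encode_rad50_spec : Claim_equal_encode_rad50 := by
  intro s length hdom
  unfold Spec_encode_rad50
  rw [encode_rad50_eq_map]
  unfold encode_rad50_alt
  by_cases hL : length ≤ 0
  · rw [if_pos hL, PySem.List.pyRange_of_pos 0 length (by norm_num), if_neg (by omega)]
    simp
  · rw [if_neg hL]
    have hdomCs : ∀ x ∈ PySem.List.slice (s.toList ++ PySem.List.pyRepeat [' '] length) none (some length),
        pvDomChar x = true := by
      intro x hx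
      have hx' := PySem.List.mem_of_mem_slice _ _ _ hx
      rcases List.mem_append.1 hx' with h | h
      · have hs : ∀ x ∈ s.toList, pvDomChar x = true := by
          simp [Dom_encode_rad50, pvDomStr, List.all_eq_true] at hdom
          exact fun y hy => hdom.1 y hy
        exact hs x h
      · rw [PySem.List.pyRepeat_singleton] at h
        obtain ⟨-, rfl⟩ := List.mem_replicate.1 h
        decide
    have hlen : (((PySem.List.slice (s.toList ++ PySem.List.pyRepeat [' '] length) none (some length)).length : Int)) = length := by
      rw [PySem.List.slice_to _ (by omega), List.length_take, PySem.List.pyRepeat_singleton,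
          List.length_append, List.length_replicate]
      omega
    set cs := PySem.List.slice (s.toList ++ PySem.List.pyRepeat [' '] length) none (some length) with hcs
    have hmul : (cs ++ PySem.List.pyRepeat [' '] (PySem.Int.mod (-((cs.length : Nat) : Int)) 3)).length % 3 = 0 := by
      rw [PySem.List.pyRepeat_singleton, List.length_append, List.length_replicate,
          PySem.Int.mod_eq_emod_of_pos (by norm_num)]
      omega
    show (PySem.List.pyRange 0 length 3).map (wordAt cs) =
      ((cs ++ PySem.List.pyRepeat [' '] (PySem.Int.mod (-((cs.length : Nat) : Int)) 3)).foldl rad50Step ([], 0, 0)).1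
    rw [fold3 _ _ le_rfl hmul []]
    simp only [List.nil_append]
    rw [← hlen, PySem.List.pyRepeat_singleton]
    exact main_triple cs.length cs le_rfl hdomCs
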